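-- pv_equiv track=rewrite | github.com/lemonade/PE | OptimumPolynomial.py | solve_equation_system
-- ===== SOURCE A (Python) =====
-- def solve_equation_system(mat): # a matrix of size k x (k + 1)
--     if len(mat) == 1:
--         return [mat[0][1]//mat[0][0]]
--     sub_mat = []
--     for i in range(len(mat) - 1):
--         row = []
--         for j in range(1, len(mat) + 1):
--             row.append(mat[i + 1][j] - mat[i][j])
--         sub_mat.append(row)
--     arr = solve_equation_system(sub_mat)
--
--     # last coef
--     x = mat[0][len(mat)]
--
--     for j in range(1, len(mat)):
--         x = x - arr[j - 1] * mat[0][j]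
--     arr.insert(0, x//mat[0][0])
--     return arr
-- ===== SOURCE B (Python) =====
-- def solve_equation_system(mat):  # a matrix of size k x (k + 1)
--     # Iterative version: forward pass stacks each level's first row while
--     # differencing down to a single row, backward pass back-substitutes.
--     stack = []
--     cur = mat
--     while len(cur) > 1:
--         stack.append(cur[0])
--         cur = [[cur[i + 1][j] - cur[i][j] for j in range(1, len(cur) + 1)]
--                for i in range(len(cur) - 1)]
--     arr = [cur[0][1] // cur[0][0]]
--     while stack:
--         row = stack.pop()
--         k = len(arr) + 1          # size of the matrix at that level
--         x = row[k]
--         for j in range(1, k):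
--             x = x - arr[j - 1] * row[j]
--         arr.insert(0, x // row[0])
--     return arr
-- ===== Notes on version B (the rewrite author's own statement) =====
-- stated objective: alternative
-- what changed: Replaces A's recursion with an explicit iterative two-pass scheme: a forward pass that repeatedly differences the matrix while stacking each level's first row, and a backward substitution pass popping the stack; same arithmetic in the same order.
import Mathlib
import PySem

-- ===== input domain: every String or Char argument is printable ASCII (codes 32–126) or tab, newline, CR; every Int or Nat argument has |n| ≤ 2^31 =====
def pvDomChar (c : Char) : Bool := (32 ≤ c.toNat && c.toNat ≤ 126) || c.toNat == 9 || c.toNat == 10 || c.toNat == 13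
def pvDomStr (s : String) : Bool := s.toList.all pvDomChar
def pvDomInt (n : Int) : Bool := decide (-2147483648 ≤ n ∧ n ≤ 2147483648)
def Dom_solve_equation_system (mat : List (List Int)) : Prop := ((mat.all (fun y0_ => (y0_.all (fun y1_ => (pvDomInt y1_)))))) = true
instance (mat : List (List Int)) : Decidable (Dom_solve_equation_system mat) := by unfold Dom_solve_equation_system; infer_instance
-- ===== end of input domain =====

-- B replaces A's row-differencing recursion by two explicit iterative passes (a forward
-- differencing pass that stacks each level's first row, and a backward substitution pass);
-- objective: alternative decomposition (iterative with an explicit stack instead of recursive).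


-- ===== PORT A =====
def solve_equation_system (mat : List (List Int)) : List Int :=
  if mat.length = 1 then
    [PySem.Int.floordiv (PySem.List.pyGetD (PySem.List.pyGetD mat 0 []) 1 0)
       (PySem.List.pyGetD (PySem.List.pyGetD mat 0 []) 0 0)]
  else
    let sub_mat : List (List Int) :=
      (PySem.List.pyRange 0 ((mat.length : Int) - 1) 1).foldl (fun sm i =>
        sm ++ [(PySem.List.pyRange 1 ((mat.length : Int) + 1) 1).foldl (fun row j =>
          row ++ [PySem.List.pyGetD (PySem.List.pyGetD mat (i + 1) []) j 0
                  - PySem.List.pyGetD (PySem.List.pyGetD mat i []) j 0]) []]) []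
    if _h : sub_mat.length < mat.length then
      let arr := solve_equation_system sub_mat
      let x0 := PySem.List.pyGetD (PySem.List.pyGetD mat 0 []) (mat.length : Int) 0
      let x := (PySem.List.pyRange 1 (mat.length : Int) 1).foldl (fun x j =>
        x - PySem.List.pyGetD arr (j - 1) 0 * PySem.List.pyGetD (PySem.List.pyGetD mat 0 []) j 0) x0
      PySem.Int.floordiv x (PySem.List.pyGetD (PySem.List.pyGetD mat 0 []) 0 0) :: arr
    else []  -- totality guard only: reached just when mat = [], where the Python recurses forever
termination_by mat.length
decreasing_by exact _h

-- ===== PORT B =====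
-- one differencing step: the next (smaller) matrix built from cur
def pvDiff (cur : List (List Int)) : List (List Int) :=
  (PySem.List.pyRange 0 ((cur.length : Int) - 1) 1).map (fun i =>
    (PySem.List.pyRange 1 ((cur.length : Int) + 1) 1).map (fun j =>
      PySem.List.pyGetD (PySem.List.pyGetD cur (i + 1) []) j 0
      - PySem.List.pyGetD (PySem.List.pyGetD cur i []) j 0))

-- forward pass: push each level's first row, difference down to one row
def pvForward (cur : List (List Int)) (stack : List (List Int)) :
    List (List Int) × List (List Int) :=
  if 1 < cur.length then
    let nxt := pvDiff cur
    if _h : nxt.length < cur.length then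
      pvForward nxt (stack ++ [PySem.List.pyGetD cur 0 []])
    else (stack, cur)  -- totality guard only: never reached (pvDiff shrinks a list of length ≥ 2)
  else (stack, cur)
termination_by cur.length
decreasing_by exact _h

-- one backward-substitution step: pop a saved first row, prepend the next unknown
def pvBack (row : List Int) (arr : List Int) : List Int :=
  let k : Int := (arr.length : Int) + 1
  let x0 := PySem.List.pyGetD row k 0
  let x := (PySem.List.pyRange 1 k 1).foldl (fun x j =>
    x - PySem.List.pyGetD arr (j - 1) 0 * PySem.List.pyGetD row j 0) x0
  PySem.Int.floordiv x (PySem.List.pyGetD row 0 0) :: arr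

def solve_equation_system_alt (mat : List (List Int)) : List Int :=
  let fb := pvForward mat []
  let base := fb.2
  fb.1.foldr pvBack
    [PySem.Int.floordiv (PySem.List.pyGetD (PySem.List.pyGetD base 0 []) 1 0)
       (PySem.List.pyGetD (PySem.List.pyGetD base 0 []) 0 0)]

-- ===== PRECONDITION & SPEC =====
-- Pre_ = exactly the inputs where the Python A returns: a nonempty k-row matrix whose rows all
-- have at least k+1 entries, and every iterated divisor is nonzero.  The divisor at level l is
-- the l-th finite difference of column l at row 0, i.e. Σ_{i≤l} (-1)^(l-i)·C(l,i)·mat[i][l];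
-- if it is 0 Python raises ZeroDivisionError, on shorter rows it raises IndexError, and on an
-- empty matrix it exceeds the recursion limit.
def Pre_solve_equation_system (mat : List (List Int)) : Prop :=
  0 < mat.length ∧ (∀ row ∈ mat, mat.length + 1 ≤ row.length) ∧
  ∀ l < mat.length,
    ((List.range (l + 1)).map (fun i =>
      (-1 : Int) ^ (l - i) * (Nat.choose l i : Int) *
        PySem.List.pyGetD (PySem.List.pyGetD mat (i : Int) []) (l : Int) 0)).sum ≠ 0
instance (mat : List (List Int)) : Decidable (Pre_solve_equation_system mat) := by
  unfold Pre_solve_equation_system; infer_instance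

def pvWitness_solve_equation_system : List (List Int) := [[1, 2]]

def Spec_solve_equation_system (mat : List (List Int)) (out : List Int) : Prop :=
  out = solve_equation_system_alt mat
instance (mat : List (List Int)) (out : List Int) : Decidable (Spec_solve_equation_system mat out) := by
  unfold Spec_solve_equation_system; infer_instance

-- ===== CLAIM (what is proved, stated in full; the proofs are below) =====
def Claim_equal_solve_equation_system : Prop :=
  ∀ (mat : List (List Int)), Dom_solve_equation_system mat →
    Pre_solve_equation_system mat →
    Spec_solve_equation_system mat (solve_equation_system mat)

-- ===== LEMMAS AND PROOFS =====

theorem subA_eq_pvDiff (mat : List (List Int)) :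
    (PySem.List.pyRange 0 ((mat.length : Int) - 1) 1).foldl (fun sm i =>
        sm ++ [(PySem.List.pyRange 1 ((mat.length : Int) + 1) 1).foldl (fun row j =>
          row ++ [PySem.List.pyGetD (PySem.List.pyGetD mat (i + 1) []) j 0
                  - PySem.List.pyGetD (PySem.List.pyGetD mat i []) j 0]) []]) []
      = pvDiff mat := by
  rw [PySem.List.foldl_append_singleton_eq_map, List.nil_append]
  unfold pvDiff
  refine List.map_congr_left (fun i _ => ?_)
  rw [PySem.List.foldl_append_singleton_eq_map, List.nil_append]

theorem length_pvDiff (mat : List (List Int)) (h : 1 ≤ mat.length) :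
    (pvDiff mat).length = mat.length - 1 := by
  unfold pvDiff
  rw [List.length_map, PySem.List.length_pyRange_one]
  omega

theorem length_solveA : ∀ (n : Nat) (mat : List (List Int)), mat.length ≤ n →
    1 ≤ mat.length → (solve_equation_system mat).length = mat.length := by
  intro n
  induction n with
  | zero => intro mat hle h1; omega
  | succ n ih =>
    intro mat hle h1
    by_cases he : mat.length = 1
    · rw [solve_equation_system]; simp [he]
    · have hk2 : 2 ≤ mat.length := by omega
      have hd := length_pvDiff mat h1
      rw [solve_equation_system, if_neg he]
      simp only [subA_eq_pvDiff]
      rw [dif_pos (by omega)]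
      simp only [List.length_cons]
      rw [ih (pvDiff mat) (by omega) (by omega)]
      omega

theorem pvForward_acc : ∀ (n : Nat) (cur stack : List (List Int)), cur.length ≤ n →
    pvForward cur stack = (stack ++ (pvForward cur []).1, (pvForward cur []).2) := by
  intro n
  induction n with
  | zero =>
    intro cur stack hle
    rw [pvForward, pvForward]
    have h1 : ¬ 1 < cur.length := by omega
    simp [h1]
  | succ n ih =>
    intro cur stack hle
    by_cases h1 : 1 < cur.length
    · by_cases hlt : (pvDiff cur).length < cur.length
      · rw [pvForward, pvForward]
        simp only [if_pos h1, dif_pos hlt]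
        rw [ih (pvDiff cur) (stack ++ [PySem.List.pyGetD cur 0 []]) (by omega),
            ih (pvDiff cur) ([] ++ [PySem.List.pyGetD cur 0 []]) (by omega)]
        simp
      · rw [pvForward, pvForward]
        simp only [if_pos h1, dif_neg hlt]
        simp
    · rw [pvForward, pvForward]
      simp [h1]

theorem main_eq : ∀ (n : Nat) (mat : List (List Int)), mat.length ≤ n →
    1 ≤ mat.length → solve_equation_system mat = solve_equation_system_alt mat := by
  intro n
  induction n with
  | zero => intro mat hle h1; omega
  | succ n ih =>
    intro mat hle h1
    by_cases he : mat.length = 1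
    · rw [solve_equation_system]
      unfold solve_equation_system_alt
      rw [pvForward]
      have h2 : ¬ 1 < mat.length := by omega
      simp [he]
    · have hk2 : 2 ≤ mat.length := by omega
      have hd := length_pvDiff mat h1
      have hlt : (pvDiff mat).length < mat.length := by omega
      -- unfold A one step
      rw [solve_equation_system, if_neg he]
      simp only [subA_eq_pvDiff]
      rw [dif_pos hlt]
      -- unfold B one step
      unfold solve_equation_system_alt
      rw [pvForward]
      have h1' : 1 < mat.length := by omega
      simp only [h1', hlt, if_true, dite_true]
      rw [pvForward_acc (pvDiff mat).length (pvDiff mat) ([] ++ [PySem.List.pyGetD mat 0 []]) le_rfl]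
      have ihe := ih (pvDiff mat) (by omega) (by omega)
      unfold solve_equation_system_alt at ihe
      have ihe' : solve_equation_system (pvDiff mat) =
          List.foldr pvBack
            [PySem.Int.floordiv
               (PySem.List.pyGetD (PySem.List.pyGetD (pvForward (pvDiff mat) []).2 0 []) 1 0)
               (PySem.List.pyGetD (PySem.List.pyGetD (pvForward (pvDiff mat) []).2 0 []) 0 0)]
            (pvForward (pvDiff mat) []).1 := ihe
      simp only [List.nil_append, List.singleton_append, List.foldr_cons]
      rw [← ihe']
      have hlen : ((solve_equation_system (pvDiff mat)).length : Int) + 1 = (mat.length : Int) := by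
        rw [length_solveA (pvDiff mat).length (pvDiff mat) le_rfl (by omega)]
        omega
      simp only [pvBack, hlen]

-- ===== VERDICT (by name: the statement is the Claim_ definition above) =====
theorem solve_equation_system_spec : Claim_equal_solve_equation_system := by
  intro mat _hd hpre
  unfold Spec_solve_equation_system
  exact main_eq mat.length mat le_rfl hpre.1
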